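-- pv_equiv track=rewrite | github.com/plilja/project-euler | problem_40/champernowne.py | _calculate_champernownes_nth_decimal
-- ===== SOURCE A (Python) =====
-- def _calculate_champernownes_nth_decimal(length):
--     res = []
--     curr_length = 0
--     i = 1
--     while curr_length < length:
--         res += [str(i)]
--         curr_length += len(res[-1])
--         i += 1
--     return "".join(res)
-- ===== SOURCE B (Python) =====
-- def _calculate_champernownes_nth_decimal(length):
--     # Find, by block arithmetic over digit-lengths, the smallest n whose
--     # cumulative concatenation length reaches `length`, then build in one shot.
--     if length <= 0:
--         return ""
--     rem = length
--     d = 1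
--     while d * 9 * 10 ** (d - 1) < rem:
--         rem -= d * 9 * 10 ** (d - 1)
--         d += 1
--     n = 10 ** (d - 1) - 1 + (rem + d - 1) // d
--     return "".join(map(str, range(1, n + 1)))
-- ===== Notes on version B (the rewrite author's own statement) =====
-- stated objective: faster
-- what changed: Instead of growing a list number by number and testing the accumulated length after each append, B computes the stopping number n arithmetically by iterating over digit-length blocks (block d contributes d*9*10^(d-1) characters) and a ceiling division, then builds the result in one shot with ''.join(map(str, range(1, n+1))).
import Mathlib
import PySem

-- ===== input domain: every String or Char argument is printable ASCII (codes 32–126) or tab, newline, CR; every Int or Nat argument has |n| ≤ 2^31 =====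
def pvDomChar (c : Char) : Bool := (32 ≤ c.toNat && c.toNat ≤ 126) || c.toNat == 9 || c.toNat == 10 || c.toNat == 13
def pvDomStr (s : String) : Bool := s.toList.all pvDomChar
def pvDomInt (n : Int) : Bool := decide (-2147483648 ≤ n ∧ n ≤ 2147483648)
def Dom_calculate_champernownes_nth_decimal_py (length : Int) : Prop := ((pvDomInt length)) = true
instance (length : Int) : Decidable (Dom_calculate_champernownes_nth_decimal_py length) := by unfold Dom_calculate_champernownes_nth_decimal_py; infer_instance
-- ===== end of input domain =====

-- B replaces A's grow-and-test list loop by block arithmetic over digit-lengths that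
-- computes the stopping number directly, then builds the string in one shot (objective: faster).


theorem pvToDigitsCore_ne_nil : ∀ (f n : Nat) (l : List Char), l ≠ [] ∨ 1 ≤ f → Nat.toDigitsCore 10 f n l ≠ [] := by
  intro f
  induction f with
  | zero =>
    intro n l h
    simp only [Nat.toDigitsCore]
    tauto
  | succ f ih =>
    intro n l _
    rw [Nat.toDigitsCore]
    by_cases h10 : n / 10 = 0
    · rw [if_pos h10]
      simp
    · rw [if_neg h10]
      exact ih (n / 10) (Nat.digitChar (n % 10) :: l) (Or.inl (by simp))

-- str(i) is never the empty string (needed for termination of A's loop)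
theorem pvToStrLen_pos (i : Int) : 1 ≤ PySem.Str.len (PySem.Int.toStr i) := by
  have h : (PySem.Int.toStr i).toList = PySem.Int.toChars i := PySem.Int.toList_toStr i
  have hne : PySem.Int.toChars i ≠ [] := by
    unfold PySem.Int.toChars
    split
    · simp
    · have : Nat.toDigits 10 i.toNat ≠ [] := by
        unfold Nat.toDigits
        exact pvToDigitsCore_ne_nil _ _ [] (Or.inr (by omega))
      simpa using this
  have hlen : 1 ≤ (PySem.Int.toStr i).toList.length := by
    rw [h]
    cases hc : PySem.Int.toChars i with
    | nil => exact absurd hc hne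
    | cons a l => simp
  have := PySem.Str.len_eq (PySem.Int.toStr i)
  omega

-- ===== PORT A =====
-- while curr_length < length: res += [str(i)]; curr_length += len(res[-1]); i += 1
-- (res[-1] right after the append is exactly str(i))
def pvGoA (length : Int) (res : List String) (curr_length : Int) (i : Int) : String :=
  if curr_length < length then
    pvGoA length (res ++ [PySem.Int.toStr i]) (curr_length + PySem.Str.len (PySem.Int.toStr i)) (i + 1)
  else
    PySem.Str.join "" res
termination_by (length - curr_length).toNat
decreasing_by
  have := pvToStrLen_pos i
  omega

def calculate_champernownes_nth_decimal_py (length : Int) : String :=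
  pvGoA length [] 0 1

-- ===== PORT B =====
-- while d * 9 * 10**(d-1) < rem: rem -= d * 9 * 10**(d-1); d += 1   (e = d - 1)
def pvGoB (rem : Int) (e : Nat) : Int × Nat :=
  if ((e : Int) + 1) * 9 * 10 ^ e < rem then
    pvGoB (rem - ((e : Int) + 1) * 9 * 10 ^ e) (e + 1)
  else
    (rem, e)
termination_by rem.toNat
decreasing_by
  have hpos : (0 : Int) < ((e : Int) + 1) * 9 * 10 ^ e := by positivity
  omega

def calculate_champernownes_nth_decimal_py_alt (length : Int) : String :=
  if length ≤ 0 then "" else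
    let p := pvGoB length 0
    let rem := p.1
    let d : Int := (p.2 : Int) + 1
    let n : Int := 10 ^ p.2 - 1 + PySem.Int.floordiv (rem + d - 1) d
    PySem.Str.join "" ((PySem.List.pyRange 1 (n + 1) 1).map PySem.Int.toStr)

-- ===== PRECONDITION & SPEC =====
def Spec_calculate_champernownes_nth_decimal_py (length : Int) (out : String) : Prop := out = calculate_champernownes_nth_decimal_py_alt length
instance (length : Int) (out : String) : Decidable (Spec_calculate_champernownes_nth_decimal_py length out) := by unfold Spec_calculate_champernownes_nth_decimal_py; infer_instance

-- ===== CLAIM (what is proved, stated in full; the proofs are below) =====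
def Claim_equal_calculate_champernownes_nth_decimal_py : Prop := ∀ (length : Int), Dom_calculate_champernownes_nth_decimal_py length → Spec_calculate_champernownes_nth_decimal_py length (calculate_champernownes_nth_decimal_py length)

-- ===== LEMMAS AND PROOFS =====

-- number of decimal digits of n
def pvD (n : Nat) : Nat :=
  if n < 10 then 1 else pvD (n / 10) + 1
termination_by n
decreasing_by
  exact Nat.div_lt_self (by omega) (by omega)

-- length of str(n) for n : Nat
def pvL (n : Nat) : Nat := (PySem.Int.toChars (n : Int)).length

-- cumulative length of "1" ++ "2" ++ … ++ str(n)
def pvS : Nat → Nat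
  | 0 => 0
  | n + 1 => pvS n + pvL (n + 1)

theorem pvToDigitsCore_len (f : Nat) : ∀ n, n < f → (Nat.toDigitsCore 10 f n []).length = pvD n := by
  induction f with
  | zero => intro n h; omega
  | succ f ih =>
    intro n h
    rw [Nat.toDigitsCore]
    by_cases h10 : n / 10 = 0
    · have : n < 10 := by omega
      rw [if_pos h10, pvD, if_pos this]
      simp
    · rw [if_neg h10]
      have hlt : n / 10 < f := by
        have h1 : n / 10 < n := Nat.div_lt_self (by omega) (by omega)
        omega
      have hge : ¬ n < 10 := by
        intro hc
        exact h10 (Nat.div_eq_of_lt hc)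
      rw [pvD, if_neg hge]
      rw [Nat.toDigitsCore_lens_eq 10 f (n / 10) (Nat.digitChar (n % 10)) []]
      rw [ih (n / 10) hlt]

theorem pvL_eq_pvD (n : Nat) : pvL n = pvD n := by
  unfold pvL PySem.Int.toChars
  rw [if_neg (by omega)]
  simp only [Int.toNat_natCast]
  unfold Nat.toDigits
  exact pvToDigitsCore_len (n + 1) n (by omega)

theorem pvD_block (e : Nat) : ∀ n, 10 ^ e ≤ n → n < 10 ^ (e + 1) → pvD n = e + 1 := by
  induction e with
  | zero =>
    intro n h1 h2
    rw [pvD, if_pos (by simpa using h2)]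
  | succ e ih =>
    intro n h1 h2
    have hp : (10 : Nat) ^ (e + 1) = 10 ^ e * 10 := by ring
    have hp2 : (10 : Nat) ^ (e + 2) = 10 ^ (e + 1) * 10 := by ring
    have hpe : 1 ≤ (10 : Nat) ^ e := Nat.one_le_pow _ _ (by omega)
    have h10 : ¬ n < 10 := by
      have : (10 : Nat) ≤ 10 ^ (e + 1) := by
        calc (10 : Nat) = 1 * 10 := by ring
        _ ≤ 10 ^ e * 10 := by exact Nat.mul_le_mul_right 10 hpe
        _ = 10 ^ (e + 1) := hp.symm
      omega
    rw [pvD, if_neg h10]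
    have hb1 : 10 ^ e ≤ n / 10 := by
      rw [Nat.le_div_iff_mul_le (by omega)]
      omega
    have hb2 : n / 10 < 10 ^ (e + 1) := by
      rw [Nat.div_lt_iff_lt_mul (by omega)]
      omega
    rw [ih (n / 10) hb1 hb2]

theorem pvL_block (e n : Nat) (h1 : 10 ^ e ≤ n) (h2 : n < 10 ^ (e + 1)) : pvL n = e + 1 := by
  rw [pvL_eq_pvD]; exact pvD_block e n h1 h2

theorem pvS_mono : ∀ {m n : Nat}, m ≤ n → pvS m ≤ pvS n := by
  intro m n h
  induction h with
  | refl => exact le_refl _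
  | step h ih => exact le_trans ih (Nat.le_add_right _ _)

theorem pvS_block_step (e : Nat) : ∀ j, j ≤ 9 * 10 ^ e →
    pvS (10 ^ e - 1 + j) = pvS (10 ^ e - 1) + (e + 1) * j := by
  intro j
  induction j with
  | zero => intro _; simp
  | succ j ih =>
    intro hj
    have hpe : 1 ≤ (10 : Nat) ^ e := Nat.one_le_pow _ _ (by omega)
    have hstep : 10 ^ e - 1 + (j + 1) = (10 ^ e - 1 + j) + 1 := by omega
    rw [hstep, pvS, ih (by omega)]
    have hL : pvL (10 ^ e - 1 + j + 1) = e + 1 := by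
      apply pvL_block
      · omega
      · have : (10 : Nat) ^ (e + 1) = 10 ^ e + 9 * 10 ^ e := by ring
        omega
    rw [hL]
    ring

theorem pvT_step (e : Nat) :
    pvS (10 ^ (e + 1) - 1) = pvS (10 ^ e - 1) + (e + 1) * (9 * 10 ^ e) := by
  have hpe : 1 ≤ (10 : Nat) ^ e := Nat.one_le_pow _ _ (by omega)
  have h : (10 : Nat) ^ (e + 1) - 1 = 10 ^ e - 1 + 9 * 10 ^ e := by
    have : (10 : Nat) ^ (e + 1) = 10 ^ e + 9 * 10 ^ e := by ring
    omega
  rw [h, pvS_block_step e (9 * 10 ^ e) (le_refl _)]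

-- invariant of B's block loop
theorem pvGoB_spec (fuel : Nat) : ∀ (rem : Int) (e : Nat), rem.toNat ≤ fuel → 1 ≤ rem →
    1 ≤ (pvGoB rem e).1 ∧
    (pvGoB rem e).1 ≤ (((pvGoB rem e).2 : Int) + 1) * 9 * 10 ^ (pvGoB rem e).2 ∧
    ((pvS (10 ^ (pvGoB rem e).2 - 1) : Nat) : Int) + (pvGoB rem e).1
      = ((pvS (10 ^ e - 1) : Nat) : Int) + rem := by
  induction fuel with
  | zero =>
    intro rem e hf h1
    omega
  | succ fuel ih =>
    intro rem e hf h1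
    rw [pvGoB]
    by_cases hc : ((e : Int) + 1) * 9 * 10 ^ e < rem
    · rw [if_pos hc]
      have hpos : (0 : Int) < ((e : Int) + 1) * 9 * 10 ^ e := by positivity
      have hrec := ih (rem - ((e : Int) + 1) * 9 * 10 ^ e) (e + 1) (by omega) (by omega)
      refine ⟨hrec.1, hrec.2.1, ?_⟩
      have hT : (pvS (10 ^ (e + 1) - 1) : Int)
          = (pvS (10 ^ e - 1) : Int) + ((e : Int) + 1) * (9 * 10 ^ e) := by
        have := pvT_step e
        push_cast [this]
        ring
      have := hrec.2.2
      rw [hT] at this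
      have hr : ((e : Int) + 1) * 9 * 10 ^ e = ((e : Int) + 1) * (9 * 10 ^ e) := by ring
      omega
    · rw [if_neg hc]
      exact ⟨h1, not_lt.mp hc, rfl⟩

-- invariant of A's grow-and-test loop: started consistently, it returns the join up to N
theorem pvGoA_spec (length : Int) (N : Nat)
    (hge : length ≤ (pvS N : Int)) (hlt : ∀ m, m < N → ((pvS m : Int) < length)) :
    ∀ (fuel k : Nat), N - k ≤ fuel → k ≤ N →
    pvGoA length ((List.range' 1 k).map (fun j : Nat => PySem.Int.toStr (j : Int))) (pvS k) ((k : Int) + 1)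
      = PySem.Str.join "" ((List.range' 1 N).map (fun j : Nat => PySem.Int.toStr (j : Int))) := by
  intro fuel
  induction fuel with
  | zero =>
    intro k hf hk
    have hkN : k = N := by omega
    subst hkN
    rw [pvGoA, if_neg (by omega)]
  | succ fuel ih =>
    intro k hf hk
    rw [pvGoA]
    by_cases hc : pvS k < length
    · rw [if_pos (by exact_mod_cast hc)]
      have hkN : k < N := by
        by_contra hcon
        have : k = N := by omega
        subst this
        omega
      have hres : (List.range' 1 k).map (fun j : Nat => PySem.Int.toStr (j : Int)) ++ [PySem.Int.toStr ((k : Int) + 1)]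
          = (List.range' 1 (k + 1)).map (fun j : Nat => PySem.Int.toStr (j : Int)) := by
        have h11 : ((1 + 1 * k : Nat) : Int) = (k : Int) + 1 := by push_cast; ring
        rw [List.range'_concat, List.map_append]
        simp only [List.map_cons, List.map_nil]
        rw [h11]
      have hcurr : pvS k + PySem.Str.len (PySem.Int.toStr ((k : Int) + 1)) = ((pvS (k + 1) : Nat) : Int) := by
        have hl : PySem.Str.len (PySem.Int.toStr ((k : Int) + 1)) = (pvL (k + 1) : Int) := by
          have h1 := PySem.Str.len_eq (PySem.Int.toStr ((k : Int) + 1))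
          have h2 := PySem.Int.toList_toStr ((k : Int) + 1)
          have h3 : ((k : Int) + 1) = ((k + 1 : Nat) : Int) := by push_cast; ring
          rw [h1, h2, h3]
          rfl
        rw [hl]
        have : pvS (k + 1) = pvS k + pvL (k + 1) := rfl
        push_cast [this]
        ring
      have hi : ((k : Int) + 1) + 1 = (((k + 1 : Nat) : Int)) + 1 := by push_cast; ring
      rw [hres, hcurr, hi]
      exact ih (k + 1) (by omega) (by omega)
    · rw [if_neg (by exact_mod_cast hc)]
      have hkN : k = N := by
        by_contra hcon
        have : k < N := by omega
        have := hlt k this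
        omega
      rw [hkN]

-- B's pyRange-built list is the same list A accumulates
theorem pvRange_eq (N : Nat) :
    PySem.List.pyRange 1 ((N : Int) + 1) 1 = (List.range' 1 N).map (fun j : Nat => (j : Int)) := by
  rw [PySem.List.pyRange_one]
  have h : ((N : Int) + 1 - 1).toNat = N := by omega
  rw [h, List.range'_eq_map_range]
  rw [List.map_map]
  apply List.map_congr_left
  intro k _
  simp only [Function.comp_apply]
  omega

theorem pvFindN (length rem : Int) (e : Nat) (hr1 : 1 ≤ rem)
    (hr2 : rem ≤ ((e : Int) + 1) * 9 * 10 ^ e)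
    (hr3 : ((pvS (10 ^ e - 1) : Nat) : Int) + rem = length) :
    ∃ N : Nat,
      (N : Int) = 10 ^ e - 1 + PySem.Int.floordiv (rem + ((e : Int) + 1) - 1) ((e : Int) + 1) ∧
      length ≤ (pvS N : Int) ∧ ∀ m : Nat, m < N → (pvS m : Int) < length := by
  have hdpos : (0 : Int) < (e : Int) + 1 := by omega
  set j : Int := PySem.Int.floordiv (rem + ((e : Int) + 1) - 1) ((e : Int) + 1) with hj
  have hjediv : j = (rem + ((e : Int) + 1) - 1) / ((e : Int) + 1) := by
    rw [hj, PySem.Int.floordiv_eq_ediv_of_pos hdpos]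
  have hmod := Int.mul_ediv_add_emod (rem + ((e : Int) + 1) - 1) ((e : Int) + 1)
  have hmnn := Int.emod_nonneg (rem + ((e : Int) + 1) - 1) (by omega : ((e : Int) + 1) ≠ 0)
  have hmlt := Int.emod_lt_of_pos (rem + ((e : Int) + 1) - 1) hdpos
  have hub : rem ≤ ((e : Int) + 1) * j := by rw [hjediv]; omega
  have hlb : ((e : Int) + 1) * (j - 1) < rem := by
    have h : ((e : Int) + 1) * (j - 1) = ((e : Int) + 1) * j - ((e : Int) + 1) := by ring
    rw [h, hjediv]; omega
  clear hmod hmnn hmlt hjediv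
  have hj1 : 1 ≤ j := by
    rcases le_or_gt 1 j with h | h
    · exact h
    · exfalso
      have hj0 : j ≤ 0 := by omega
      have : ((e : Int) + 1) * j ≤ 0 := mul_nonpos_of_nonneg_of_nonpos (le_of_lt hdpos) hj0
      omega
  have hjub : j ≤ 9 * 10 ^ e := by
    have h9 : rem ≤ ((e : Int) + 1) * (9 * 10 ^ e) := by
      calc rem ≤ ((e : Int) + 1) * 9 * 10 ^ e := hr2
      _ = ((e : Int) + 1) * (9 * 10 ^ e) := by ring
    have h2 : ((e : Int) + 1) * (j - 1) < ((e : Int) + 1) * (9 * 10 ^ e) := lt_of_lt_of_le hlb h9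
    have h3 : j - 1 < 9 * 10 ^ e := lt_of_mul_lt_mul_left h2 (le_of_lt hdpos)
    omega
  clear hr2
  have hpeN : 1 ≤ (10 : Nat) ^ e := Nat.one_le_pow _ _ (by omega)
  have hpow : ((10 ^ e : Nat) : Int) = 10 ^ e := by push_cast; ring
  have h9pow : ((9 * 10 ^ e : Nat) : Int) = 9 * 10 ^ e := by push_cast; ring
  have hjt : (j.toNat : Int) = j := by omega
  have hjn : j.toNat ≤ 9 * 10 ^ e := by omega
  have hSN := pvS_block_step e j.toNat hjn
  have hSNi : ((pvS (10 ^ e - 1 + j.toNat) : Nat) : Int)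
      = ((pvS (10 ^ e - 1) : Nat) : Int) + ((e : Int) + 1) * j := by
    rw [hSN]
    push_cast
    rw [hjt]
  refine ⟨10 ^ e - 1 + j.toNat, ?_, ?_, ?_⟩
  · omega
  · omega
  · intro m hm
    have hjt1 : ((j.toNat - 1 : Nat) : Int) = j - 1 := by omega
    have hm1 : m ≤ 10 ^ e - 1 + (j.toNat - 1) := by omega
    have hSN1 := pvS_block_step e (j.toNat - 1) (by omega)
    have hSN1i : ((pvS (10 ^ e - 1 + (j.toNat - 1)) : Nat) : Int)
        = ((pvS (10 ^ e - 1) : Nat) : Int) + ((e : Int) + 1) * (j - 1) := by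
      rw [hSN1]
      push_cast
      rw [hjt1]
    have hmm := pvS_mono hm1
    omega

-- ===== VERDICT (by name: the statement is the Claim_ definition above) =====
theorem calculate_champernownes_nth_decimal_py_spec : Claim_equal_calculate_champernownes_nth_decimal_py := by
  intro length _
  unfold Spec_calculate_champernownes_nth_decimal_py
  unfold calculate_champernownes_nth_decimal_py calculate_champernownes_nth_decimal_py_alt
  by_cases hle : length ≤ 0
  · rw [if_pos hle, pvGoA, if_neg (by omega)]
    rfl
  · rw [if_neg hle]
    have h1 : 1 ≤ length := by omega
    obtain ⟨⟨rem, e⟩, hgb⟩ : ∃ p, pvGoB length 0 = p := ⟨_, rfl⟩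
    have hsp := pvGoB_spec length.toNat length 0 (by omega) h1
    rw [hgb] at hsp
    have hr1 : 1 ≤ rem := hsp.1
    have hr2 : rem ≤ ((e : Int) + 1) * 9 * 10 ^ e := hsp.2.1
    have hr3 : ((pvS (10 ^ e - 1) : Nat) : Int) + rem = length := by
      have h := hsp.2.2
      have h0 : ((pvS (10 ^ 0 - 1) : Nat) : Int) = 0 := rfl
      have h' : ((pvS (10 ^ e - 1) : Nat) : Int) + rem = ((pvS (10 ^ 0 - 1) : Nat) : Int) + length := h
      omega
    obtain ⟨N, hNn, hge, hlt⟩ := pvFindN length rem e hr1 hr2 hr3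
    have hA := pvGoA_spec length N hge hlt N 0 (by omega) (by omega)
    simp only [List.range'_zero, List.map_nil, Nat.cast_zero, zero_add] at hA
    have hA' : pvGoA length [] 0 1
        = PySem.Str.join "" ((List.range' 1 N).map (fun j : Nat => PySem.Int.toStr (j : Int))) := by
      have h0 : pvS 0 = 0 := rfl
      rw [h0] at hA
      exact_mod_cast hA
    rw [hA', hgb]
    show PySem.Str.join "" ((List.range' 1 N).map (fun j : Nat => PySem.Int.toStr (j : Int)))
        = PySem.Str.join "" ((PySem.List.pyRange 1
            ((10 ^ e - 1 + PySem.Int.floordiv (rem + ((e : Int) + 1) - 1) ((e : Int) + 1)) + 1) 1).map PySem.Int.toStr)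
    rw [← hNn, pvRange_eq N, List.map_map]
    rfl
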